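-- pv_equiv track=rewrite | github.com/Leewodls/Coding_Test | 프로그래머스/0/181929. 원소들의 곱과 합/원소들의 곱과 합.py | solution
-- ===== SOURCE A (Python) =====
-- def solution(num_list):
--     answer = 0
--     a=1
--     b=0
--     for i in num_list:
--         a = a*i
--         b+=i
--         if a<b**2:
--             answer=1
--         else:
--             answer=0
--     return answer
-- ===== SOURCE B (Python) =====
-- def solution(num_list):
--     def prod(xs):
--         if not xs:
--             return 1
--         if len(xs) == 1:
--             return xs[0]
--         m = len(xs) // 2
--         return prod(xs[:m]) * prod(xs[m:])
--     return 1 if prod(num_list) < sum(num_list) ** 2 else 0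
-- ===== Notes on version B (the rewrite author's own statement) =====
-- stated objective: faster
-- what changed: Replaces the fused loop with per-iteration accumulator updates and dead flag assignments by two independent reductions followed by one comparison: the built-in sum, and a divide-and-conquer product that multiplies balanced halves, so big-int multiplications stay between operands of similar size instead of a long accumulator times a small factor.
import Mathlib
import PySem

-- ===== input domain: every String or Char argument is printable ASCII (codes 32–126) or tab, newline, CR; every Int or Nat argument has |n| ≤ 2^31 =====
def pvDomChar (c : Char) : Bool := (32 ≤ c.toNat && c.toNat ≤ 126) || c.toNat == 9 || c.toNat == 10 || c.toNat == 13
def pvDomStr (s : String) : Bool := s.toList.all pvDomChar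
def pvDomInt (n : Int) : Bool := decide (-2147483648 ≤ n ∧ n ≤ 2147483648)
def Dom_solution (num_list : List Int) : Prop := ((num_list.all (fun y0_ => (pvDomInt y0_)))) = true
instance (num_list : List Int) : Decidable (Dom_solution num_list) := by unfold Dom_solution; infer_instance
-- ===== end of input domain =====

-- B replaces A's fused accumulator loop by two independent reductions
-- (a recursive product and the list sum) and one final comparison; measurably faster at scale via balanced big-int multiplies.

-- ===== PORT A =====
-- the loop state is (answer, a, b), updated exactly as in A
def solutionLoop : List Int → Int → Int → Int → Int
  | [], answer, _, _ => answer
  | i :: t, _, a, b =>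
      let a' := a * i
      let b' := b + i
      solutionLoop t (if a' < b' ^ 2 then 1 else 0) a' b'

def solution (num_list : List Int) : Int :=
  solutionLoop num_list 0 1 0

-- ===== PORT B =====
-- divide-and-conquer product, as in Source B's prod
def prodDC : List Int → Int
  | [] => 1
  | [x] => x
  | x :: y :: t =>
      let xs := x :: y :: t
      let m := xs.length / 2
      prodDC (xs.take m) * prodDC (xs.drop m)
termination_by xs => xs.length
decreasing_by
  · simp [List.length_take]; omega
  · simp; omega

def solution_alt (num_list : List Int) : Int :=
  if prodDC num_list < (num_list.sum) ^ 2 then 1 else 0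

-- ===== PRECONDITION & SPEC =====
def Spec_solution (num_list : List Int) (out : Int) : Prop := out = solution_alt num_list
instance (num_list : List Int) (out : Int) : Decidable (Spec_solution num_list out) := by unfold Spec_solution; infer_instance

-- ===== CLAIM (what is proved, stated in full; the proofs are below) =====
def Claim_equal_solution : Prop := ∀ (num_list : List Int), Dom_solution num_list → Spec_solution num_list (solution num_list)

-- ===== LEMMAS AND PROOFS =====
-- On a nonempty suffix the loop's final answer compares the accumulated
-- product/sum against the remainder's product/sum.
theorem solutionLoop_cons (t : List Int) : ∀ (x a b ans : Int),
    solutionLoop (x :: t) ans a b =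
      if a * (x * t.prod) < (b + (x + t.sum)) ^ 2 then 1 else 0 := by
  induction t with
  | nil => intro x a b ans; simp [solutionLoop]
  | cons y t ih =>
      intro x a b ans
      have h := ih y (a * x) (b + x) (if a * x < (b + x) ^ 2 then 1 else 0)
      simp only [solutionLoop] at h ⊢
      rw [h]
      have h1 : a * x * (y * t.prod) = a * (x * (y * t.prod)) := by ring
      have h2 : b + x + (y + t.sum) = b + (x + (y + t.sum)) := by ring
      simp [List.prod_cons, List.sum_cons, h1, h2]

theorem prodDC_eq (xs : List Int) : prodDC xs = xs.prod := by
  fun_induction prodDC with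
  | case1 => simp
  | case2 x => simp
  | case3 x y t xs m ih1 ih2 =>
      rw [ih1, ih2]
      exact List.prod_take_mul_prod_drop _ _

-- ===== VERDICT (by name: the statement is the Claim_ definition above) =====
theorem solution_spec : Claim_equal_solution := by
  intro num_list _
  unfold Spec_solution solution solution_alt
  cases num_list with
  | nil => rw [prodDC_eq]; simp [solutionLoop]
  | cons x t =>
      rw [solutionLoop_cons, prodDC_eq]
      simp [List.prod_cons, List.sum_cons]
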